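-- pv_equiv track=rewrite | github.com/PolychronMidi/Polychron | tools/HME/mcp/server/tools_analysis/__init__.py | _cap_list_items
-- ===== SOURCE A (Python) =====
-- def _cap_list_items(text: str, max_items: int = 12) -> str:
--     """Cap consecutive indented list items (lines starting with 2+ spaces or - )."""
--     lines = text.split("\n")
--     result = []
--     list_count = 0
--     capped = False
--     total_remaining = 0
--     for line in lines:
--         is_list = line.startswith("  ") or line.startswith("- ")
--         if is_list:
--             list_count += 1
--             if list_count <= max_items:
--                 result.append(line)
--             elif not capped:
--                 total_remaining += 1
--             else:
--                 total_remaining += 1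
--         else:
--             if list_count > max_items and not capped:
--                 result.append(f"  …(+{total_remaining} more items)")
--                 capped = True
--                 total_remaining = 0
--             list_count = 0
--             capped = False
--             result.append(line)
--     if list_count > max_items and not capped:
--         result.append(f"  …(+{total_remaining} more items)")
--     return "\n".join(result)
-- ===== SOURCE B (Python) =====
-- def _cap_list_items(text: str, max_items: int = 12) -> str:
--     """Cap consecutive indented list items (lines starting with 2+ spaces or - )."""
--     def is_item(l):
--         return l.startswith("  ") or l.startswith("- ")
--
--     lines = text.split("\n")
--     out = []
--     while lines:
--         flag = is_item(lines[0])
--         i = 1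
--         while i < len(lines) and is_item(lines[i]) == flag:
--             i += 1
--         run, lines = lines[:i], lines[i:]
--         if not flag:
--             out.extend(run)
--         else:
--             keep = max(max_items, 0)
--             out.extend(run[:keep])
--             if len(run) > max_items:
--                 out.append(f"  …(+{len(run) - keep} more items)")
--     return "\n".join(out)
-- ===== Notes on version B (the rewrite author's own statement) =====
-- stated objective: simpler
-- what changed: A is a flat one-line-at-a-time state machine maintaining running counters (list_count, capped, total_remaining); B instead spans off each maximal run of list/non-list lines and handles a whole run at once by slicing it and appending one summary line.
-- outside the precondition, e.g. on _cap_list_items('a', -1): A returns '  …(+0 more items)\na\n  …(+0 more items)', B returns 'a'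
import Mathlib
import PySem

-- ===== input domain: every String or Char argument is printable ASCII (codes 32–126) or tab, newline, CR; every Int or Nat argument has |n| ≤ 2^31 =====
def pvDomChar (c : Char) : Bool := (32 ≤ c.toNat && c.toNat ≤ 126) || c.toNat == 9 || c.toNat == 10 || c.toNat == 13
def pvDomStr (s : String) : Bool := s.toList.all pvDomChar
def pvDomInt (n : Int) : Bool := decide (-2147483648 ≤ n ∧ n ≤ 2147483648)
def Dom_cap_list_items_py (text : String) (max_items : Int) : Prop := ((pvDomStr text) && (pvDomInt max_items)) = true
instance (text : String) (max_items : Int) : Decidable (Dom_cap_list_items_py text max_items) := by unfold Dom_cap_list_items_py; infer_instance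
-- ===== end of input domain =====

-- B replaces A's flat one-line-at-a-time counter state machine by a group-and-slice pass
-- (span off each maximal run, slice it, append one summary line); objective: simpler.

-- ===== PORT A =====
def pvIsItem (line : String) : Bool :=
  PySem.Str.startswith line "  " || PySem.Str.startswith line "- "

def pvSummary (n : Int) : String := "  …(+" ++ PySem.Int.toStr n ++ " more items)"

-- loop body of A: state (result, list_count, capped, total_remaining); in the non-list
-- branch Python appends the summary, sets capped=True, tr=0, then lc=0, capped=False,
-- appends the line — net effect written out here.
def capStep (max_items : Int) :
    (List String × Int × Bool × Int) → String → (List String × Int × Bool × Int)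
  | (result, list_count, capped, total_remaining), line =>
    if pvIsItem line = true then
      if list_count + 1 ≤ max_items then
        (result ++ [line], list_count + 1, capped, total_remaining)
      else if capped = false then
        (result, list_count + 1, capped, total_remaining + 1)
      else
        (result, list_count + 1, capped, total_remaining + 1)
    else
      if max_items < list_count ∧ capped = false then
        (result ++ [pvSummary total_remaining] ++ [line], 0, false, 0)
      else
        (result ++ [line], 0, false, total_remaining)

def cap_list_items_py (text : String) (max_items : Int) : String :=
  let lines := (PySem.Str.split? text "\n").getD []
  let st := lines.foldl (capStep max_items) ([], 0, false, 0)
  let result := if max_items < st.2.1 ∧ st.2.2.1 = false then st.1 ++ [pvSummary st.2.2.2] else st.1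
  PySem.Str.join "\n" result

-- ===== PORT B =====
-- Source B's while-loop: each iteration spans off one maximal run and contributes one segment.
def capAltGo (max_items : Int) (lines : List String) : List String :=
  match lines with
  | [] => []
  | x :: rest =>
    let flag := pvIsItem x
    let run := x :: rest.takeWhile (fun l => pvIsItem l == flag)
    let rest' := rest.dropWhile (fun l => pvIsItem l == flag)
    (if flag = false then run
     else
       let keep := max max_items 0
       run.take keep.toNat ++
         (if max_items < (run.length : Int) then [pvSummary ((run.length : Int) - keep)] else []))
    ++ capAltGo max_items rest'
termination_by lines.length
decreasing_by
  simp only [List.length_cons]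
  exact Nat.lt_succ_of_le (rest.length_dropWhile_le _)

def cap_list_items_py_alt (text : String) (max_items : Int) : String :=
  PySem.Str.join "\n" (capAltGo max_items ((PySem.Str.split? text "\n").getD []))

-- ===== PRECONDITION & SPEC =====
-- Pre_ excludes negative max_items (a negative cap is outside the natural domain of this
-- truncation helper): there A's leftover-counter logic emits a spurious
-- "  …(+0 more items)" line after every non-list line, which B does not mimic.
def Pre_cap_list_items_py (text : String) (max_items : Int) : Prop := 0 ≤ max_items
instance (text : String) (max_items : Int) : Decidable (Pre_cap_list_items_py text max_items) := by
  unfold Pre_cap_list_items_py; infer_instance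

def pvWitness_cap_list_items_py : String × Int := ("- a\n- b\n- c\nend", 1)

def Spec_cap_list_items_py (text : String) (max_items : Int) (out : String) : Prop := out = cap_list_items_py_alt text max_items
instance (text : String) (max_items : Int) (out : String) : Decidable (Spec_cap_list_items_py text max_items out) := by unfold Spec_cap_list_items_py; infer_instance

-- ===== CLAIM (what is proved, stated in full; the proofs are below) =====
def Claim_equal_cap_list_items_py : Prop := ∀ (text : String) (max_items : Int), Dom_cap_list_items_py text max_items → Pre_cap_list_items_py text max_items → Spec_cap_list_items_py text max_items (cap_list_items_py text max_items)

-- ===== LEMMAS AND PROOFS =====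

-- A's final fix-up after the loop.
def capFin (max_items : Int) (st : List String × Int × Bool × Int) : List String :=
  if max_items < st.2.1 ∧ st.2.2.1 = false then st.1 ++ [pvSummary st.2.2.2] else st.1

theorem altGo_cons_false (m : Int) (x : String) (rest : List String)
    (hx : pvIsItem x = false) :
    capAltGo m (x :: rest) = x :: capAltGo m rest := by
  cases rest with
  | nil => simp [capAltGo, hx]
  | cons y rs =>
    by_cases hy : pvIsItem y = false
    · rw [capAltGo, capAltGo]
      simp [hx, hy, List.takeWhile_cons, List.dropWhile_cons]
    · rw [capAltGo]
      simp [hx, List.takeWhile_cons, List.dropWhile_cons, hy]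

theorem listRun (m : Int) :
    ∀ (run : List String), (∀ l ∈ run, pvIsItem l = true) →
    ∀ (res : List String) (lc tr : Int), 0 ≤ lc →
      List.foldl (capStep m) (res, lc, false, tr) run
        = (res ++ run.take (m - lc).toNat, lc + run.length, false,
           tr + ((run.length - (m - lc).toNat : ℕ) : ℤ)) := by
  intro run
  induction run with
  | nil => intro _ res lc tr _; simp
  | cons x rs ih =>
    intro hall res lc tr hlc
    have hx : pvIsItem x = true := hall x (by simp)
    have hall' : ∀ l ∈ rs, pvIsItem l = true := fun l hl => hall l (by simp [hl])
    by_cases hle : lc + 1 ≤ m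
    · have hk : (m - lc).toNat = (m - (lc + 1)).toNat + 1 := by omega
      simp only [List.foldl_cons, capStep, hx, if_pos hle, if_true]
      rw [ih hall' (res ++ [x]) (lc + 1) tr (by omega)]
      rw [hk]
      refine Prod.ext ?_ (Prod.ext (by simp; omega) (Prod.ext rfl ?_))
      · simp [List.take_succ_cons, List.append_assoc]
      · simp only [List.length_cons]
        omega
    · have hk : (m - lc).toNat = 0 := by omega
      have hk' : (m - (lc + 1)).toNat = 0 := by omega
      simp only [List.foldl_cons, capStep, hx, if_neg hle, if_true]
      rw [ih hall' res (lc + 1) (tr + 1) (by omega)]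
      rw [hk, hk']
      refine Prod.ext (by simp) (Prod.ext (by simp; omega) (Prod.ext rfl ?_))
      simp only [List.length_cons]
      omega

theorem dropWhile_head_false {α : Type} (p : α → Bool) (l : List α) (y : α) (d : List α)
    (h : l.dropWhile p = y :: d) : p y = false := by
  induction l with
  | nil => simp at h
  | cons a as ih =>
    by_cases ha : p a = true
    · rw [List.dropWhile_cons_of_pos ha] at h; exact ih h
    · rw [List.dropWhile_cons_of_neg ha] at h
      cases h; simpa using ha

theorem capMain (m : Int) (hm : 0 ≤ m) :
    ∀ (n : ℕ) (lines : List String), lines.length ≤ n → ∀ res : List String,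
      capFin m (List.foldl (capStep m) (res, 0, false, 0) lines)
        = res ++ capAltGo m lines := by
  intro n
  induction n with
  | zero =>
    intro lines h res
    have : lines = [] := List.eq_nil_of_length_eq_zero (Nat.le_zero.mp h)
    subst this
    simp [capFin, capAltGo]
    omega
  | succ n ih =>
    intro lines h res
    cases lines with
    | nil => simp [capFin, capAltGo]; omega
    | cons x rest =>
      have hrest : rest.length ≤ n := by simp at h; omega
      by_cases hxb : pvIsItem x = true
      · -- list run
        set t := rest.takeWhile (fun l => pvIsItem l == true) with ht
        set d := rest.dropWhile (fun l => pvIsItem l == true) with hd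
        have hsplit : rest = t ++ d := (List.takeWhile_append_dropWhile).symm
        have hallt : ∀ l ∈ t, pvIsItem l = true := by
          intro l hl
          have := List.mem_takeWhile_imp hl
          simpa using this
        have hallrun : ∀ l ∈ x :: t, pvIsItem l = true := by
          intro l hl; rcases List.mem_cons.mp hl with h1 | h1
          · subst h1; exact hxb
          · exact hallt l h1
        have hfold1 : List.foldl (capStep m) (res, 0, false, 0) (x :: rest)
            = List.foldl (capStep m)
                (res ++ (x :: t).take m.toNat, (0:ℤ) + ((x :: t).length : ℤ), false,
                 (0:ℤ) + (((x :: t).length - m.toNat : ℕ) : ℤ)) d := by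
          conv_lhs => rw [show x :: rest = (x :: t) ++ d by rw [hsplit, List.cons_append]]
          rw [List.foldl_append]
          rw [listRun m (x :: t) hallrun res 0 0 le_rfl]
          simp
        have hmax : max m 0 = m := max_eq_left hm
        have haltx : capAltGo m (x :: rest)
            = ((x :: t).take m.toNat ++
                (if m < ((x :: t).length : Int) then
                  [pvSummary (((x :: t).length : Int) - m)] else []))
              ++ capAltGo m d := by
          rw [capAltGo]
          simp only [hxb]
          simp [ht, hd, hmax]
        cases hdc : d with
        | nil =>
          rw [hfold1, hdc, haltx, hdc]
          simp only [List.foldl_nil, capFin, capAltGo, List.append_nil, zero_add]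
          by_cases hlt : m < ((x :: t).length : ℤ)
          · rw [if_pos ⟨hlt, trivial⟩, if_pos hlt]
            rw [show (((x :: t).length - m.toNat : ℕ) : ℤ) = ((x :: t).length : ℤ) - m from by
              omega]
            simp [List.append_assoc]
          · rw [if_neg (fun hcon => hlt hcon.1), if_neg hlt]
            rw [List.take_of_length_le (by omega : (x :: t).length ≤ m.toNat)]
            simp
        | cons y d' =>
          have hyb : pvIsItem y = false := by
            have := dropWhile_head_false (fun l => pvIsItem l == true) rest y d'
              (by rw [← hd, hdc])
            simpa using this
          have hlen : d'.length ≤ n := by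
            have h2 := hrest
            rw [hsplit, hdc] at h2
            simp at h2; omega
          rw [hfold1, hdc]
          simp only [List.foldl_cons]
          have hstep : capStep m
              (res ++ (x :: t).take m.toNat, (0:ℤ) + ((x :: t).length : ℤ), false,
               (0:ℤ) + (((x :: t).length - m.toNat : ℕ) : ℤ)) y
              = ((res ++ ((x :: t).take m.toNat ++
                  (if m < ((x :: t).length : Int) then
                    [pvSummary (((x :: t).length : Int) - m)] else []))) ++ [y],
                 0, false, 0) := by
            simp only [capStep, hyb, Bool.false_eq_true, if_false, zero_add]
            by_cases hlt : m < ((x :: t).length : ℤ)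
            · rw [if_pos ⟨hlt, trivial⟩]
              rw [show (((x :: t).length - m.toNat : ℕ) : ℤ) = ((x :: t).length : ℤ) - m from by
                omega]
              rw [if_pos hlt]
              simp [List.append_assoc]
            · rw [if_neg (fun hcon => hlt hcon.1), if_neg hlt]
              rw [show (((x :: t).length - m.toNat : ℕ) : ℤ) = 0 from by omega]
              simp
          rw [hstep, ih d' hlen]
          rw [haltx, hdc, altGo_cons_false m y d' hyb]
          simp [List.append_assoc]
      · -- non-list line
        have hx' : pvIsItem x = false := by simpa using hxb
        have hstep : capStep m (res, 0, false, 0) x = (res ++ [x], 0, false, 0) := by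
          simp only [capStep, hx', Bool.false_eq_true, if_false]
          rw [if_neg (by intro hcon; omega)]
        simp only [List.foldl_cons, hstep]
        rw [ih rest hrest (res ++ [x])]
        rw [altGo_cons_false m x rest hx']
        simp

-- ===== VERDICT (by name: the statement is the Claim_ definition above) =====
theorem cap_list_items_py_spec : Claim_equal_cap_list_items_py := by
  intro text max_items _ hpre
  unfold Spec_cap_list_items_py cap_list_items_py cap_list_items_py_alt
  have := capMain max_items hpre ((PySem.Str.split? text "\n").getD []).length
    ((PySem.Str.split? text "\n").getD []) le_rfl []
  simp only [capFin] at this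
  simp only [this, List.nil_append]
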